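-- pv_equiv track=rewrite | github.com/lukeinglis/FantasyBaseball | analysis/draft_analysis.py | classify_position
-- ===== SOURCE A (Python) =====
-- def classify_position(eligible_slots: str) -> str:
--     slots = set(s.strip() for s in str(eligible_slots).split(","))
--     if "SP" in slots:  return "SP"
--     if "RP" in slots:  return "RP"
--     if "P"  in slots:  return "P"
--     if "C"  in slots:  return "C"
--     if "SS" in slots:  return "SS"
--     if "2B" in slots:  return "2B"
--     if "3B" in slots:  return "3B"
--     if "1B" in slots:  return "1B"
--     if "CF" in slots or "LF" in slots or "RF" in slots or "OF" in slots:
--         return "OF"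
--     if "DH" in slots:  return "DH"
--     return "UTIL"
-- ===== SOURCE B (Python) =====
-- _RANK = {"SP": 0, "RP": 1, "P": 2, "C": 3, "SS": 4, "2B": 5, "3B": 6,
--          "1B": 7, "CF": 8, "LF": 8, "RF": 8, "OF": 8, "DH": 9}
-- _OUT = ["SP", "RP", "P", "C", "SS", "2B", "3B", "1B", "OF", "DH", "UTIL"]
--
--
-- def classify_position(eligible_slots: str) -> str:
--     best = 10
--     for part in str(eligible_slots).split(","):
--         r = _RANK.get(part.strip(), 10)
--         if r < best:
--             best = r
--     return _OUT[best]
-- ===== Notes on version B (the rewrite author's own statement) =====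
-- stated objective: alternative
-- what changed: Replaces the ordered chain of membership tests over a fixed code list with a single pass over the input's slots that tracks the minimum priority rank from a lookup table, then maps the best rank to its canonical name.
import Mathlib
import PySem

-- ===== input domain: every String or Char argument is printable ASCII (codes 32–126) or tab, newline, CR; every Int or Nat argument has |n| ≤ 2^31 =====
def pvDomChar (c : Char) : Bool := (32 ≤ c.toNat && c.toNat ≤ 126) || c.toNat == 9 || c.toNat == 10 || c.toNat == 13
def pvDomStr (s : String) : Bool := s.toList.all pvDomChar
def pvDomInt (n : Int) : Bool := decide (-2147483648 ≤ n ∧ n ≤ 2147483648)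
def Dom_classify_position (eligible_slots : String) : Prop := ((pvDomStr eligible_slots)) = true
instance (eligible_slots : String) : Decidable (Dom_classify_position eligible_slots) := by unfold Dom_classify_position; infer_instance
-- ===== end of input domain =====

-- B replaces A's ordered chain of membership tests over the fixed code list by a single pass over
-- the input's slots that tracks the minimum priority rank from a lookup table (objective: alternative).

-- ===== PORT A =====
def classify_position (eligible_slots : String) : String :=
  let slots : PySem.Set String :=
    PySem.Set.ofList (((PySem.Str.split? eligible_slots ",").getD []).map (fun s => PySem.Str.strip s))
  if PySem.Set.contains slots "SP" then "SP"
  else if PySem.Set.contains slots "RP" then "RP"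
  else if PySem.Set.contains slots "P" then "P"
  else if PySem.Set.contains slots "C" then "C"
  else if PySem.Set.contains slots "SS" then "SS"
  else if PySem.Set.contains slots "2B" then "2B"
  else if PySem.Set.contains slots "3B" then "3B"
  else if PySem.Set.contains slots "1B" then "1B"
  else if PySem.Set.contains slots "CF" || PySem.Set.contains slots "LF" ||
          PySem.Set.contains slots "RF" || PySem.Set.contains slots "OF" then "OF"
  else if PySem.Set.contains slots "DH" then "DH"
  else "UTIL"

-- ===== PORT B =====
def pvRankDict : PySem.Dict String Int := PySem.Dict.ofList [("SP", 0), ("RP", 1), ("P", 2), ("C", 3), ("SS", 4), ("2B", 5), ("3B", 6), ("1B", 7), ("CF", 8), ("LF", 8), ("RF", 8), ("OF", 8), ("DH", 9)]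

def pvOutList : List String := ["SP", "RP", "P", "C", "SS", "2B", "3B", "1B", "OF", "DH", "UTIL"]

def classify_position_alt (eligible_slots : String) : String :=
  let best : Int :=
    ((PySem.Str.split? eligible_slots ",").getD []).foldl
      (fun best part =>
        let r := PySem.Dict.getD pvRankDict (PySem.Str.strip part) 10
        if r < best then r else best) 10
  PySem.List.pyGetD pvOutList best "UTIL"

-- ===== PRECONDITION & SPEC =====
def Spec_classify_position (eligible_slots : String) (out : String) : Prop := out = classify_position_alt eligible_slots
instance (eligible_slots : String) (out : String) : Decidable (Spec_classify_position eligible_slots out) := by unfold Spec_classify_position; infer_instance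

-- ===== CLAIM (what is proved, stated in full; the proofs are below) =====
def Claim_equal_classify_position : Prop := ∀ (eligible_slots : String), Dom_classify_position eligible_slots → Spec_classify_position eligible_slots (classify_position eligible_slots)

-- ===== LEMMAS AND PROOFS =====

-- the priority rank B's dict lookup assigns to one (already stripped) slot string
def pvRank (s : String) : Int := PySem.Dict.getD pvRankDict s 10

-- the rank table as a plain association list
def pvTable : List (String × Int) := [("SP", 0), ("RP", 1), ("P", 2), ("C", 3), ("SS", 4), ("2B", 5), ("3B", 6), ("1B", 7), ("CF", 8), ("LF", 8), ("RF", 8), ("OF", 8), ("DH", 9)]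

lemma pvItems : pvRankDict.items = pvTable := by
  rw [pvRankDict, PySem.Dict.ofList, PySem.Dict.update]
  rw [PySem.Dict.items_foldl_insert_fresh (k := Prod.fst) (v := Prod.snd)]
  · rfl
  · intro a _; rfl
  · decide

-- first-match association-list lookup with default 10
def pvLookupD : List (String × Int) → String → Int
  | [], _ => 10
  | (k, v) :: r, s => if k == s then v else pvLookupD r s

lemma pvGetD_eq_lookupD (l : List (String × Int)) (s : String) :
    (Option.map (fun p => p.2) (List.find? (fun p => p.1 == s) l)).getD 10 = pvLookupD l s := by
  induction l with
  | nil => rfl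
  | cons a r ih =>
    cases h : (a.1 == s) <;> simp [h, pvLookupD, ih]

lemma pvRank_eq (s : String) : pvRank s = pvLookupD pvTable s := by
  rw [pvRank, PySem.Dict.getD, PySem.Dict.get?, pvItems]
  exact pvGetD_eq_lookupD _ s

-- the lookup as nested tests, for case analysis
def pvRankSpec (s : String) : Int :=
  if "SP" == s then 0 else if "RP" == s then 1 else if "P" == s then 2 else if "C" == s then 3
  else if "SS" == s then 4 else if "2B" == s then 5 else if "3B" == s then 6 else if "1B" == s then 7
  else if "CF" == s then 8 else if "LF" == s then 8 else if "RF" == s then 8 else if "OF" == s then 8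
  else if "DH" == s then 9 else 10

set_option maxHeartbeats 1000000 in
lemma pvLookup_spec (s : String) : pvLookupD pvTable s = pvRankSpec s := rfl

lemma pvSpec_cases (s : String) :
    pvRankSpec s = 10 ∨
    (pvRankSpec s = 0 ∧ s = "SP") ∨
    (pvRankSpec s = 1 ∧ s = "RP") ∨
    (pvRankSpec s = 2 ∧ s = "P") ∨
    (pvRankSpec s = 3 ∧ s = "C") ∨
    (pvRankSpec s = 4 ∧ s = "SS") ∨
    (pvRankSpec s = 5 ∧ s = "2B") ∨
    (pvRankSpec s = 6 ∧ s = "3B") ∨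
    (pvRankSpec s = 7 ∧ s = "1B") ∨
    (pvRankSpec s = 8 ∧ (s = "CF" ∨ s = "LF" ∨ s = "RF" ∨ s = "OF")) ∨
    (pvRankSpec s = 9 ∧ s = "DH") := by
  cases h1 : ("SP" == s) with
  | true =>
    have hv : pvRankSpec s = 0 := by
      unfold pvRankSpec
      rw [if_pos h1]
    exact Or.inr (Or.inl (⟨hv, (beq_iff_eq.mp h1).symm⟩))
  | false =>
    cases h2 : ("RP" == s) with
    | true =>
      have hv : pvRankSpec s = 1 := by
        unfold pvRankSpec
        rw [if_neg (show ¬(("SP" == s) = true) by simp [h1]), if_pos h2]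
      exact Or.inr (Or.inr (Or.inl (⟨hv, (beq_iff_eq.mp h2).symm⟩)))
    | false =>
      cases h3 : ("P" == s) with
      | true =>
        have hv : pvRankSpec s = 2 := by
          unfold pvRankSpec
          rw [if_neg (show ¬(("SP" == s) = true) by simp [h1]), if_neg (show ¬(("RP" == s) = true) by simp [h2]), if_pos h3]
        exact Or.inr (Or.inr (Or.inr (Or.inl (⟨hv, (beq_iff_eq.mp h3).symm⟩))))
      | false =>
        cases h4 : ("C" == s) with
        | true =>
          have hv : pvRankSpec s = 3 := by
            unfold pvRankSpec
            rw [if_neg (show ¬(("SP" == s) = true) by simp [h1]), if_neg (show ¬(("RP" == s) = true) by simp [h2]), if_neg (show ¬(("P" == s) = true) by simp [h3]), if_pos h4]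
          exact Or.inr (Or.inr (Or.inr (Or.inr (Or.inl (⟨hv, (beq_iff_eq.mp h4).symm⟩)))))
        | false =>
          cases h5 : ("SS" == s) with
          | true =>
            have hv : pvRankSpec s = 4 := by
              unfold pvRankSpec
              rw [if_neg (show ¬(("SP" == s) = true) by simp [h1]), if_neg (show ¬(("RP" == s) = true) by simp [h2]), if_neg (show ¬(("P" == s) = true) by simp [h3]), if_neg (show ¬(("C" == s) = true) by simp [h4]), if_pos h5]
            exact Or.inr (Or.inr (Or.inr (Or.inr (Or.inr (Or.inl (⟨hv, (beq_iff_eq.mp h5).symm⟩))))))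
          | false =>
            cases h6 : ("2B" == s) with
            | true =>
              have hv : pvRankSpec s = 5 := by
                unfold pvRankSpec
                rw [if_neg (show ¬(("SP" == s) = true) by simp [h1]), if_neg (show ¬(("RP" == s) = true) by simp [h2]), if_neg (show ¬(("P" == s) = true) by simp [h3]), if_neg (show ¬(("C" == s) = true) by simp [h4]), if_neg (show ¬(("SS" == s) = true) by simp [h5]), if_pos h6]
              exact Or.inr (Or.inr (Or.inr (Or.inr (Or.inr (Or.inr (Or.inl (⟨hv, (beq_iff_eq.mp h6).symm⟩)))))))
            | false =>
              cases h7 : ("3B" == s) with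
              | true =>
                have hv : pvRankSpec s = 6 := by
                  unfold pvRankSpec
                  rw [if_neg (show ¬(("SP" == s) = true) by simp [h1]), if_neg (show ¬(("RP" == s) = true) by simp [h2]), if_neg (show ¬(("P" == s) = true) by simp [h3]), if_neg (show ¬(("C" == s) = true) by simp [h4]), if_neg (show ¬(("SS" == s) = true) by simp [h5]), if_neg (show ¬(("2B" == s) = true) by simp [h6]), if_pos h7]
                exact Or.inr (Or.inr (Or.inr (Or.inr (Or.inr (Or.inr (Or.inr (Or.inl (⟨hv, (beq_iff_eq.mp h7).symm⟩))))))))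
              | false =>
                cases h8 : ("1B" == s) with
                | true =>
                  have hv : pvRankSpec s = 7 := by
                    unfold pvRankSpec
                    rw [if_neg (show ¬(("SP" == s) = true) by simp [h1]), if_neg (show ¬(("RP" == s) = true) by simp [h2]), if_neg (show ¬(("P" == s) = true) by simp [h3]), if_neg (show ¬(("C" == s) = true) by simp [h4]), if_neg (show ¬(("SS" == s) = true) by simp [h5]), if_neg (show ¬(("2B" == s) = true) by simp [h6]), if_neg (show ¬(("3B" == s) = true) by simp [h7]), if_pos h8]
                  exact Or.inr (Or.inr (Or.inr (Or.inr (Or.inr (Or.inr (Or.inr (Or.inr (Or.inl (⟨hv, (beq_iff_eq.mp h8).symm⟩)))))))))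
                | false =>
                  cases h9 : ("CF" == s) with
                  | true =>
                    have hv : pvRankSpec s = 8 := by
                      unfold pvRankSpec
                      rw [if_neg (show ¬(("SP" == s) = true) by simp [h1]), if_neg (show ¬(("RP" == s) = true) by simp [h2]), if_neg (show ¬(("P" == s) = true) by simp [h3]), if_neg (show ¬(("C" == s) = true) by simp [h4]), if_neg (show ¬(("SS" == s) = true) by simp [h5]), if_neg (show ¬(("2B" == s) = true) by simp [h6]), if_neg (show ¬(("3B" == s) = true) by simp [h7]), if_neg (show ¬(("1B" == s) = true) by simp [h8]), if_pos h9]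
                    exact Or.inr (Or.inr (Or.inr (Or.inr (Or.inr (Or.inr (Or.inr (Or.inr (Or.inr (Or.inl (⟨hv, Or.inl ((beq_iff_eq.mp h9).symm)⟩))))))))))
                  | false =>
                    cases h10 : ("LF" == s) with
                    | true =>
                      have hv : pvRankSpec s = 8 := by
                        unfold pvRankSpec
                        rw [if_neg (show ¬(("SP" == s) = true) by simp [h1]), if_neg (show ¬(("RP" == s) = true) by simp [h2]), if_neg (show ¬(("P" == s) = true) by simp [h3]), if_neg (show ¬(("C" == s) = true) by simp [h4]), if_neg (show ¬(("SS" == s) = true) by simp [h5]), if_neg (show ¬(("2B" == s) = true) by simp [h6]), if_neg (show ¬(("3B" == s) = true) by simp [h7]), if_neg (show ¬(("1B" == s) = true) by simp [h8]), if_neg (show ¬(("CF" == s) = true) by simp [h9]), if_pos h10]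
                      exact Or.inr (Or.inr (Or.inr (Or.inr (Or.inr (Or.inr (Or.inr (Or.inr (Or.inr (Or.inl (⟨hv, Or.inr (Or.inl ((beq_iff_eq.mp h10).symm))⟩))))))))))
                    | false =>
                      cases h11 : ("RF" == s) with
                      | true =>
                        have hv : pvRankSpec s = 8 := by
                          unfold pvRankSpec
                          rw [if_neg (show ¬(("SP" == s) = true) by simp [h1]), if_neg (show ¬(("RP" == s) = true) by simp [h2]), if_neg (show ¬(("P" == s) = true) by simp [h3]), if_neg (show ¬(("C" == s) = true) by simp [h4]), if_neg (show ¬(("SS" == s) = true) by simp [h5]), if_neg (show ¬(("2B" == s) = true) by simp [h6]), if_neg (show ¬(("3B" == s) = true) by simp [h7]), if_neg (show ¬(("1B" == s) = true) by simp [h8]), if_neg (show ¬(("CF" == s) = true) by simp [h9]), if_neg (show ¬(("LF" == s) = true) by simp [h10]), if_pos h11]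
                        exact Or.inr (Or.inr (Or.inr (Or.inr (Or.inr (Or.inr (Or.inr (Or.inr (Or.inr (Or.inl (⟨hv, Or.inr (Or.inr (Or.inl ((beq_iff_eq.mp h11).symm)))⟩))))))))))
                      | false =>
                        cases h12 : ("OF" == s) with
                        | true =>
                          have hv : pvRankSpec s = 8 := by
                            unfold pvRankSpec
                            rw [if_neg (show ¬(("SP" == s) = true) by simp [h1]), if_neg (show ¬(("RP" == s) = true) by simp [h2]), if_neg (show ¬(("P" == s) = true) by simp [h3]), if_neg (show ¬(("C" == s) = true) by simp [h4]), if_neg (show ¬(("SS" == s) = true) by simp [h5]), if_neg (show ¬(("2B" == s) = true) by simp [h6]), if_neg (show ¬(("3B" == s) = true) by simp [h7]), if_neg (show ¬(("1B" == s) = true) by simp [h8]), if_neg (show ¬(("CF" == s) = true) by simp [h9]), if_neg (show ¬(("LF" == s) = true) by simp [h10]), if_neg (show ¬(("RF" == s) = true) by simp [h11]), if_pos h12]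
                          exact Or.inr (Or.inr (Or.inr (Or.inr (Or.inr (Or.inr (Or.inr (Or.inr (Or.inr (Or.inl (⟨hv, Or.inr (Or.inr (Or.inr ((beq_iff_eq.mp h12).symm)))⟩))))))))))
                        | false =>
                          cases h13 : ("DH" == s) with
                          | true =>
                            have hv : pvRankSpec s = 9 := by
                              unfold pvRankSpec
                              rw [if_neg (show ¬(("SP" == s) = true) by simp [h1]), if_neg (show ¬(("RP" == s) = true) by simp [h2]), if_neg (show ¬(("P" == s) = true) by simp [h3]), if_neg (show ¬(("C" == s) = true) by simp [h4]), if_neg (show ¬(("SS" == s) = true) by simp [h5]), if_neg (show ¬(("2B" == s) = true) by simp [h6]), if_neg (show ¬(("3B" == s) = true) by simp [h7]), if_neg (show ¬(("1B" == s) = true) by simp [h8]), if_neg (show ¬(("CF" == s) = true) by simp [h9]), if_neg (show ¬(("LF" == s) = true) by simp [h10]), if_neg (show ¬(("RF" == s) = true) by simp [h11]), if_neg (show ¬(("OF" == s) = true) by simp [h12]), if_pos h13]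
                            exact Or.inr (Or.inr (Or.inr (Or.inr (Or.inr (Or.inr (Or.inr (Or.inr (Or.inr (Or.inr (⟨hv, (beq_iff_eq.mp h13).symm⟩))))))))))
                          | false =>
                            have hv : pvRankSpec s = 10 := by
                              unfold pvRankSpec
                              rw [if_neg (show ¬(("SP" == s) = true) by simp [h1]), if_neg (show ¬(("RP" == s) = true) by simp [h2]), if_neg (show ¬(("P" == s) = true) by simp [h3]), if_neg (show ¬(("C" == s) = true) by simp [h4]), if_neg (show ¬(("SS" == s) = true) by simp [h5]), if_neg (show ¬(("2B" == s) = true) by simp [h6]), if_neg (show ¬(("3B" == s) = true) by simp [h7]), if_neg (show ¬(("1B" == s) = true) by simp [h8]), if_neg (show ¬(("CF" == s) = true) by simp [h9]), if_neg (show ¬(("LF" == s) = true) by simp [h10]), if_neg (show ¬(("RF" == s) = true) by simp [h11]), if_neg (show ¬(("OF" == s) = true) by simp [h12]), if_neg (show ¬(("DH" == s) = true) by simp [h13])]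
                            exact Or.inl hv

lemma pvRank_spec (s : String) : pvRank s = pvRankSpec s :=
  (pvRank_eq s).trans (pvLookup_spec s)

lemma pvRank_cases (s : String) :
    pvRank s = 10 ∨
    (pvRank s = 0 ∧ s = "SP") ∨
    (pvRank s = 1 ∧ s = "RP") ∨
    (pvRank s = 2 ∧ s = "P") ∨
    (pvRank s = 3 ∧ s = "C") ∨
    (pvRank s = 4 ∧ s = "SS") ∨
    (pvRank s = 5 ∧ s = "2B") ∨
    (pvRank s = 6 ∧ s = "3B") ∨
    (pvRank s = 7 ∧ s = "1B") ∨
    (pvRank s = 8 ∧ (s = "CF" ∨ s = "LF" ∨ s = "RF" ∨ s = "OF")) ∨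
    (pvRank s = 9 ∧ s = "DH") := by
  have h := pvSpec_cases s
  rw [← pvRank_spec s] at h
  exact h

lemma pvMemCases (m : List String) (s : String) (hs : s ∈ m) :
    pvRank s = 10 ∨
    (pvRank s = 0 ∧ m.contains "SP" = true) ∨
    (pvRank s = 1 ∧ m.contains "RP" = true) ∨
    (pvRank s = 2 ∧ m.contains "P" = true) ∨
    (pvRank s = 3 ∧ m.contains "C" = true) ∨
    (pvRank s = 4 ∧ m.contains "SS" = true) ∨
    (pvRank s = 5 ∧ m.contains "2B" = true) ∨
    (pvRank s = 6 ∧ m.contains "3B" = true) ∨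
    (pvRank s = 7 ∧ m.contains "1B" = true) ∨
    (pvRank s = 8 ∧ (m.contains "CF" || m.contains "LF" || m.contains "RF" || m.contains "OF") = true) ∨
    (pvRank s = 9 ∧ m.contains "DH" = true) := by
  rcases pvRank_cases s with h0 | ⟨hr0, rfl⟩ | ⟨hr1, rfl⟩ | ⟨hr2, rfl⟩ | ⟨hr3, rfl⟩ | ⟨hr4, rfl⟩ | ⟨hr5, rfl⟩ | ⟨hr6, rfl⟩ | ⟨hr7, rfl⟩ | ⟨hr8, rfl | rfl | rfl | rfl⟩ | ⟨hr9, rfl⟩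
  · exact Or.inl h0
  · exact Or.inr (Or.inl (⟨hr0, List.contains_iff_mem.mpr hs⟩))
  · exact Or.inr (Or.inr (Or.inl (⟨hr1, List.contains_iff_mem.mpr hs⟩)))
  · exact Or.inr (Or.inr (Or.inr (Or.inl (⟨hr2, List.contains_iff_mem.mpr hs⟩))))
  · exact Or.inr (Or.inr (Or.inr (Or.inr (Or.inl (⟨hr3, List.contains_iff_mem.mpr hs⟩)))))
  · exact Or.inr (Or.inr (Or.inr (Or.inr (Or.inr (Or.inl (⟨hr4, List.contains_iff_mem.mpr hs⟩))))))
  · exact Or.inr (Or.inr (Or.inr (Or.inr (Or.inr (Or.inr (Or.inl (⟨hr5, List.contains_iff_mem.mpr hs⟩)))))))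
  · exact Or.inr (Or.inr (Or.inr (Or.inr (Or.inr (Or.inr (Or.inr (Or.inl (⟨hr6, List.contains_iff_mem.mpr hs⟩))))))))
  · exact Or.inr (Or.inr (Or.inr (Or.inr (Or.inr (Or.inr (Or.inr (Or.inr (Or.inl (⟨hr7, List.contains_iff_mem.mpr hs⟩)))))))))
  · refine Or.inr (Or.inr (Or.inr (Or.inr (Or.inr (Or.inr (Or.inr (Or.inr (Or.inr (Or.inl (⟨hr8, ?_⟩))))))))))
    simp [hs]
  · refine Or.inr (Or.inr (Or.inr (Or.inr (Or.inr (Or.inr (Or.inr (Or.inr (Or.inr (Or.inl (⟨hr8, ?_⟩))))))))))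
    simp [hs]
  · refine Or.inr (Or.inr (Or.inr (Or.inr (Or.inr (Or.inr (Or.inr (Or.inr (Or.inr (Or.inl (⟨hr8, ?_⟩))))))))))
    simp [hs]
  · refine Or.inr (Or.inr (Or.inr (Or.inr (Or.inr (Or.inr (Or.inr (Or.inr (Or.inr (Or.inl (⟨hr8, ?_⟩))))))))))
    simp [hs]
  · exact Or.inr (Or.inr (Or.inr (Or.inr (Or.inr (Or.inr (Or.inr (Or.inr (Or.inr (Or.inr (⟨hr9, List.contains_iff_mem.mpr hs⟩))))))))))

lemma pvSetContains (m : List String) (x : String) :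
    PySem.Set.contains (PySem.Set.ofList m) x = m.contains x := by
  rw [Bool.eq_iff_iff]
  simp [PySem.Set.mem_ofList]

lemma pvFold_eq (l : List String) :
    l.foldl
      (fun best part =>
        if PySem.Dict.getD pvRankDict (PySem.Str.strip part) 10 < best then
          PySem.Dict.getD pvRankDict (PySem.Str.strip part) 10
        else best) 10
      = ((l.map (fun s => PySem.Str.strip s)).map pvRank).foldl min 10 := by
  rw [List.foldl_map, List.foldl_map]
  have h : (fun (best : Int) (part : String) =>
        if PySem.Dict.getD pvRankDict (PySem.Str.strip part) 10 < best then
          PySem.Dict.getD pvRankDict (PySem.Str.strip part) 10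
        else best)
      = (fun (x : Int) (y : String) => min x (pvRank (PySem.Str.strip y))) := by
    funext b p
    simp only [pvRank]
    split_ifs <;> omega
  rw [h]

lemma pvMain (m : List String) :
    (if m.contains "SP" then "SP"
     else if m.contains "RP" then "RP"
     else if m.contains "P" then "P"
     else if m.contains "C" then "C"
     else if m.contains "SS" then "SS"
     else if m.contains "2B" then "2B"
     else if m.contains "3B" then "3B"
     else if m.contains "1B" then "1B"
     else if m.contains "CF" || m.contains "LF" || m.contains "RF" || m.contains "OF" then "OF"
     else if m.contains "DH" then "DH"
     else "UTIL")
      = PySem.List.pyGetD pvOutList ((m.map pvRank).foldl min 10) "UTIL" := by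
  split_ifs with c1 c2 c3 c4 c5 c6 c7 c8 c9 c10
  · have hmm := PySem.List.foldl_min_mem (m.map pvRank) 10
    have hle := (PySem.List.foldl_min_le (m.map pvRank) 10).2
    have hrk : pvRank "SP" = 0 := by rw [pvRank_eq]; rfl
    have hub : (m.map pvRank).foldl min 10 ≤ 0 := by
      have := hle (pvRank "SP") (List.mem_map.mpr ⟨"SP", List.contains_iff_mem.mp c1, rfl⟩)
      omega
    have hlb : 0 ≤ (m.map pvRank).foldl min 10 := by
      rcases hmm with h | h
      · omega
      · obtain ⟨s, hs, heq⟩ := List.mem_map.mp h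
        rcases pvMemCases m s hs with h0 | ⟨hr, hc⟩ | ⟨hr, hc⟩ | ⟨hr, hc⟩ | ⟨hr, hc⟩ | ⟨hr, hc⟩ | ⟨hr, hc⟩ | ⟨hr, hc⟩ | ⟨hr, hc⟩ | ⟨hr, hc⟩ | ⟨hr, hc⟩
        · omega
        · omega
        · omega
        · omega
        · omega
        · omega
        · omega
        · omega
        · omega
        · omega
        · omega
    have hv : (m.map pvRank).foldl min 10 = 0 := le_antisymm hub hlb
    rw [hv]
    rfl
  · have hmm := PySem.List.foldl_min_mem (m.map pvRank) 10
    have hle := (PySem.List.foldl_min_le (m.map pvRank) 10).2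
    have hrk : pvRank "RP" = 1 := by rw [pvRank_eq]; rfl
    have hub : (m.map pvRank).foldl min 10 ≤ 1 := by
      have := hle (pvRank "RP") (List.mem_map.mpr ⟨"RP", List.contains_iff_mem.mp c2, rfl⟩)
      omega
    have hlb : 1 ≤ (m.map pvRank).foldl min 10 := by
      rcases hmm with h | h
      · omega
      · obtain ⟨s, hs, heq⟩ := List.mem_map.mp h
        rcases pvMemCases m s hs with h0 | ⟨hr, hc⟩ | ⟨hr, hc⟩ | ⟨hr, hc⟩ | ⟨hr, hc⟩ | ⟨hr, hc⟩ | ⟨hr, hc⟩ | ⟨hr, hc⟩ | ⟨hr, hc⟩ | ⟨hr, hc⟩ | ⟨hr, hc⟩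
        · omega
        · exact absurd hc c1
        · omega
        · omega
        · omega
        · omega
        · omega
        · omega
        · omega
        · omega
        · omega
    have hv : (m.map pvRank).foldl min 10 = 1 := le_antisymm hub hlb
    rw [hv]
    rfl
  · have hmm := PySem.List.foldl_min_mem (m.map pvRank) 10
    have hle := (PySem.List.foldl_min_le (m.map pvRank) 10).2
    have hrk : pvRank "P" = 2 := by rw [pvRank_eq]; rfl
    have hub : (m.map pvRank).foldl min 10 ≤ 2 := by
      have := hle (pvRank "P") (List.mem_map.mpr ⟨"P", List.contains_iff_mem.mp c3, rfl⟩)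
      omega
    have hlb : 2 ≤ (m.map pvRank).foldl min 10 := by
      rcases hmm with h | h
      · omega
      · obtain ⟨s, hs, heq⟩ := List.mem_map.mp h
        rcases pvMemCases m s hs with h0 | ⟨hr, hc⟩ | ⟨hr, hc⟩ | ⟨hr, hc⟩ | ⟨hr, hc⟩ | ⟨hr, hc⟩ | ⟨hr, hc⟩ | ⟨hr, hc⟩ | ⟨hr, hc⟩ | ⟨hr, hc⟩ | ⟨hr, hc⟩
        · omega
        · exact absurd hc c1
        · exact absurd hc c2
        · omega
        · omega
        · omega
        · omega
        · omega
        · omega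
        · omega
        · omega
    have hv : (m.map pvRank).foldl min 10 = 2 := le_antisymm hub hlb
    rw [hv]
    rfl
  · have hmm := PySem.List.foldl_min_mem (m.map pvRank) 10
    have hle := (PySem.List.foldl_min_le (m.map pvRank) 10).2
    have hrk : pvRank "C" = 3 := by rw [pvRank_eq]; rfl
    have hub : (m.map pvRank).foldl min 10 ≤ 3 := by
      have := hle (pvRank "C") (List.mem_map.mpr ⟨"C", List.contains_iff_mem.mp c4, rfl⟩)
      omega
    have hlb : 3 ≤ (m.map pvRank).foldl min 10 := by
      rcases hmm with h | h
      · omega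
      · obtain ⟨s, hs, heq⟩ := List.mem_map.mp h
        rcases pvMemCases m s hs with h0 | ⟨hr, hc⟩ | ⟨hr, hc⟩ | ⟨hr, hc⟩ | ⟨hr, hc⟩ | ⟨hr, hc⟩ | ⟨hr, hc⟩ | ⟨hr, hc⟩ | ⟨hr, hc⟩ | ⟨hr, hc⟩ | ⟨hr, hc⟩
        · omega
        · exact absurd hc c1
        · exact absurd hc c2
        · exact absurd hc c3
        · omega
        · omega
        · omega
        · omega
        · omega
        · omega
        · omega
    have hv : (m.map pvRank).foldl min 10 = 3 := le_antisymm hub hlb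
    rw [hv]
    rfl
  · have hmm := PySem.List.foldl_min_mem (m.map pvRank) 10
    have hle := (PySem.List.foldl_min_le (m.map pvRank) 10).2
    have hrk : pvRank "SS" = 4 := by rw [pvRank_eq]; rfl
    have hub : (m.map pvRank).foldl min 10 ≤ 4 := by
      have := hle (pvRank "SS") (List.mem_map.mpr ⟨"SS", List.contains_iff_mem.mp c5, rfl⟩)
      omega
    have hlb : 4 ≤ (m.map pvRank).foldl min 10 := by
      rcases hmm with h | h
      · omega
      · obtain ⟨s, hs, heq⟩ := List.mem_map.mp h
        rcases pvMemCases m s hs with h0 | ⟨hr, hc⟩ | ⟨hr, hc⟩ | ⟨hr, hc⟩ | ⟨hr, hc⟩ | ⟨hr, hc⟩ | ⟨hr, hc⟩ | ⟨hr, hc⟩ | ⟨hr, hc⟩ | ⟨hr, hc⟩ | ⟨hr, hc⟩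
        · omega
        · exact absurd hc c1
        · exact absurd hc c2
        · exact absurd hc c3
        · exact absurd hc c4
        · omega
        · omega
        · omega
        · omega
        · omega
        · omega
    have hv : (m.map pvRank).foldl min 10 = 4 := le_antisymm hub hlb
    rw [hv]
    rfl
  · have hmm := PySem.List.foldl_min_mem (m.map pvRank) 10
    have hle := (PySem.List.foldl_min_le (m.map pvRank) 10).2
    have hrk : pvRank "2B" = 5 := by rw [pvRank_eq]; rfl
    have hub : (m.map pvRank).foldl min 10 ≤ 5 := by
      have := hle (pvRank "2B") (List.mem_map.mpr ⟨"2B", List.contains_iff_mem.mp c6, rfl⟩)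
      omega
    have hlb : 5 ≤ (m.map pvRank).foldl min 10 := by
      rcases hmm with h | h
      · omega
      · obtain ⟨s, hs, heq⟩ := List.mem_map.mp h
        rcases pvMemCases m s hs with h0 | ⟨hr, hc⟩ | ⟨hr, hc⟩ | ⟨hr, hc⟩ | ⟨hr, hc⟩ | ⟨hr, hc⟩ | ⟨hr, hc⟩ | ⟨hr, hc⟩ | ⟨hr, hc⟩ | ⟨hr, hc⟩ | ⟨hr, hc⟩
        · omega
        · exact absurd hc c1
        · exact absurd hc c2
        · exact absurd hc c3
        · exact absurd hc c4
        · exact absurd hc c5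
        · omega
        · omega
        · omega
        · omega
        · omega
    have hv : (m.map pvRank).foldl min 10 = 5 := le_antisymm hub hlb
    rw [hv]
    rfl
  · have hmm := PySem.List.foldl_min_mem (m.map pvRank) 10
    have hle := (PySem.List.foldl_min_le (m.map pvRank) 10).2
    have hrk : pvRank "3B" = 6 := by rw [pvRank_eq]; rfl
    have hub : (m.map pvRank).foldl min 10 ≤ 6 := by
      have := hle (pvRank "3B") (List.mem_map.mpr ⟨"3B", List.contains_iff_mem.mp c7, rfl⟩)
      omega
    have hlb : 6 ≤ (m.map pvRank).foldl min 10 := by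
      rcases hmm with h | h
      · omega
      · obtain ⟨s, hs, heq⟩ := List.mem_map.mp h
        rcases pvMemCases m s hs with h0 | ⟨hr, hc⟩ | ⟨hr, hc⟩ | ⟨hr, hc⟩ | ⟨hr, hc⟩ | ⟨hr, hc⟩ | ⟨hr, hc⟩ | ⟨hr, hc⟩ | ⟨hr, hc⟩ | ⟨hr, hc⟩ | ⟨hr, hc⟩
        · omega
        · exact absurd hc c1
        · exact absurd hc c2
        · exact absurd hc c3
        · exact absurd hc c4
        · exact absurd hc c5
        · exact absurd hc c6
        · omega
        · omega
        · omega
        · omega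
    have hv : (m.map pvRank).foldl min 10 = 6 := le_antisymm hub hlb
    rw [hv]
    rfl
  · have hmm := PySem.List.foldl_min_mem (m.map pvRank) 10
    have hle := (PySem.List.foldl_min_le (m.map pvRank) 10).2
    have hrk : pvRank "1B" = 7 := by rw [pvRank_eq]; rfl
    have hub : (m.map pvRank).foldl min 10 ≤ 7 := by
      have := hle (pvRank "1B") (List.mem_map.mpr ⟨"1B", List.contains_iff_mem.mp c8, rfl⟩)
      omega
    have hlb : 7 ≤ (m.map pvRank).foldl min 10 := by
      rcases hmm with h | h
      · omega
      · obtain ⟨s, hs, heq⟩ := List.mem_map.mp h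
        rcases pvMemCases m s hs with h0 | ⟨hr, hc⟩ | ⟨hr, hc⟩ | ⟨hr, hc⟩ | ⟨hr, hc⟩ | ⟨hr, hc⟩ | ⟨hr, hc⟩ | ⟨hr, hc⟩ | ⟨hr, hc⟩ | ⟨hr, hc⟩ | ⟨hr, hc⟩
        · omega
        · exact absurd hc c1
        · exact absurd hc c2
        · exact absurd hc c3
        · exact absurd hc c4
        · exact absurd hc c5
        · exact absurd hc c6
        · exact absurd hc c7
        · omega
        · omega
        · omega
    have hv : (m.map pvRank).foldl min 10 = 7 := le_antisymm hub hlb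
    rw [hv]
    rfl
  · have hmm := PySem.List.foldl_min_mem (m.map pvRank) 10
    have hle := (PySem.List.foldl_min_le (m.map pvRank) 10).2
    rw [Bool.or_eq_true, Bool.or_eq_true, Bool.or_eq_true] at c9
    have hub : (m.map pvRank).foldl min 10 ≤ 8 := by
      rcases c9 with ((h | h) | h) | h
      · have hrk : pvRank "CF" = 8 := by rw [pvRank_eq]; rfl
        have := hle (pvRank "CF") (List.mem_map.mpr ⟨"CF", List.contains_iff_mem.mp h, rfl⟩)
        omega
      · have hrk : pvRank "LF" = 8 := by rw [pvRank_eq]; rfl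
        have := hle (pvRank "LF") (List.mem_map.mpr ⟨"LF", List.contains_iff_mem.mp h, rfl⟩)
        omega
      · have hrk : pvRank "RF" = 8 := by rw [pvRank_eq]; rfl
        have := hle (pvRank "RF") (List.mem_map.mpr ⟨"RF", List.contains_iff_mem.mp h, rfl⟩)
        omega
      · have hrk : pvRank "OF" = 8 := by rw [pvRank_eq]; rfl
        have := hle (pvRank "OF") (List.mem_map.mpr ⟨"OF", List.contains_iff_mem.mp h, rfl⟩)
        omega
    have hlb : 8 ≤ (m.map pvRank).foldl min 10 := by
      rcases hmm with h | h
      · omega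
      · obtain ⟨s, hs, heq⟩ := List.mem_map.mp h
        rcases pvMemCases m s hs with h0 | ⟨hr, hc⟩ | ⟨hr, hc⟩ | ⟨hr, hc⟩ | ⟨hr, hc⟩ | ⟨hr, hc⟩ | ⟨hr, hc⟩ | ⟨hr, hc⟩ | ⟨hr, hc⟩ | ⟨hr, hc⟩ | ⟨hr, hc⟩
        · omega
        · exact absurd hc c1
        · exact absurd hc c2
        · exact absurd hc c3
        · exact absurd hc c4
        · exact absurd hc c5
        · exact absurd hc c6
        · exact absurd hc c7
        · exact absurd hc c8
        · omega
        · omega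
    have hv : (m.map pvRank).foldl min 10 = 8 := le_antisymm hub hlb
    rw [hv]
    rfl
  · have hmm := PySem.List.foldl_min_mem (m.map pvRank) 10
    have hle := (PySem.List.foldl_min_le (m.map pvRank) 10).2
    have hrk : pvRank "DH" = 9 := by rw [pvRank_eq]; rfl
    have hub : (m.map pvRank).foldl min 10 ≤ 9 := by
      have := hle (pvRank "DH") (List.mem_map.mpr ⟨"DH", List.contains_iff_mem.mp c10, rfl⟩)
      omega
    have hlb : 9 ≤ (m.map pvRank).foldl min 10 := by
      rcases hmm with h | h
      · omega
      · obtain ⟨s, hs, heq⟩ := List.mem_map.mp h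
        rcases pvMemCases m s hs with h0 | ⟨hr, hc⟩ | ⟨hr, hc⟩ | ⟨hr, hc⟩ | ⟨hr, hc⟩ | ⟨hr, hc⟩ | ⟨hr, hc⟩ | ⟨hr, hc⟩ | ⟨hr, hc⟩ | ⟨hr, hc⟩ | ⟨hr, hc⟩
        · omega
        · exact absurd hc c1
        · exact absurd hc c2
        · exact absurd hc c3
        · exact absurd hc c4
        · exact absurd hc c5
        · exact absurd hc c6
        · exact absurd hc c7
        · exact absurd hc c8
        · exact absurd hc c9
        · omega
    have hv : (m.map pvRank).foldl min 10 = 9 := le_antisymm hub hlb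
    rw [hv]
    rfl
  · have hmm := PySem.List.foldl_min_mem (m.map pvRank) 10
    have hle := (PySem.List.foldl_min_le (m.map pvRank) 10).2
    have hub : (m.map pvRank).foldl min 10 ≤ 10 := (PySem.List.foldl_min_le (m.map pvRank) 10).1
    have hlb : 10 ≤ (m.map pvRank).foldl min 10 := by
      rcases hmm with h | h
      · omega
      · obtain ⟨s, hs, heq⟩ := List.mem_map.mp h
        rcases pvMemCases m s hs with h0 | ⟨hr, hc⟩ | ⟨hr, hc⟩ | ⟨hr, hc⟩ | ⟨hr, hc⟩ | ⟨hr, hc⟩ | ⟨hr, hc⟩ | ⟨hr, hc⟩ | ⟨hr, hc⟩ | ⟨hr, hc⟩ | ⟨hr, hc⟩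
        · omega
        · exact absurd hc c1
        · exact absurd hc c2
        · exact absurd hc c3
        · exact absurd hc c4
        · exact absurd hc c5
        · exact absurd hc c6
        · exact absurd hc c7
        · exact absurd hc c8
        · exact absurd hc c9
        · exact absurd hc c10
    have hv : (m.map pvRank).foldl min 10 = 10 := le_antisymm hub hlb
    rw [hv]
    rfl

-- ===== VERDICT (by name: the statement is the Claim_ definition above) =====
theorem classify_position_spec : Claim_equal_classify_position := by
  intro e _
  unfold Spec_classify_position classify_position classify_position_alt
  simp only [pvSetContains, pvFold_eq]
  exact pvMain (((PySem.Str.split? e ",").getD []).map (fun s => PySem.Str.strip s))
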